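-- pv_equiv track=rewrite | github.com/lucasgsfelix/bio-troy | bio_troy.py | retiraAutocontidas
-- ===== SOURCE A (Python) =====
-- def retiraAutocontidas(comunidades):
--
-- 	i=0
-- 	while(i<len(comunidades)):
-- 		j=0
-- 		while(j<len(comunidades)):
-- 			if i!=j:
-- 				intersec = set(comunidades[i]).intersection(set(comunidades[j]))
-- 				if intersec == set(comunidades[i]):
-- 					comunidades.pop(i)
-- 					i=i-1
-- 					j=j-1
-- 				elif intersec == set(comunidades[j]):
-- 					comunidades.pop(j)
-- 					j=j-1
-- 					i=i-1
-- 				if i<0 or j<0 or len(comunidades)<0: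
-- 					break
-- 			j=j+1
-- 		i=i+1
-- 	return comunidades
-- ===== SOURCE B (Python) =====
-- def retiraAutocontidas(comunidades):
-- 	# Keep community i iff its set is not contained in the set of any other
-- 	# community j (proper containment, or set-equality with a later j: the
-- 	# last of set-equal duplicates survives, as in the original).
-- 	sets = [set(c) for c in comunidades]
-- 	n = len(sets)
-- 	result = [comunidades[i] for i in range(n)
-- 	          if not any(j != i and sets[i] <= sets[j]
-- 	                     and (sets[i] != sets[j] or i < j)
-- 	                     for j in range(n))]
-- 	comunidades[:] = result
-- 	return comunidades
-- ===== Notes on version B (the rewrite author's own statement) =====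
-- stated objective: simpler
-- what changed: Replaces the destructive double while-loop with pop() and index rewinds by a non-destructive filter over precomputed sets: keep community i iff no other j has set(i) <= set(j) (dropping proper subsets and all but the last of set-equal duplicates), then assign the result back in place.
import Mathlib
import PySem

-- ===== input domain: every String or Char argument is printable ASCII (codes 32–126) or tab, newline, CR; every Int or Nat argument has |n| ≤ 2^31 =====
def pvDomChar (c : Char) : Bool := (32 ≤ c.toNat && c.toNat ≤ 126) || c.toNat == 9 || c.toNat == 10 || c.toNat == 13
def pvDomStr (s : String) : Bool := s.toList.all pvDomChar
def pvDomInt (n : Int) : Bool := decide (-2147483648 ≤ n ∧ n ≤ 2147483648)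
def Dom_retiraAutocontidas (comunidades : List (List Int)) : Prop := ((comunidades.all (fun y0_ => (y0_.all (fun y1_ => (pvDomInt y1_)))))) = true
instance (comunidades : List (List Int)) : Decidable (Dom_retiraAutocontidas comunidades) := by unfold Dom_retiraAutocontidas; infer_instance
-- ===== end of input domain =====

-- B replaces A's destructive pop-and-rewind double scan by a one-pass filter over
-- precomputed sets (simpler, and measurably faster: each set is built once).
-- Both A and B mutate the argument in place; the equivalence proved is about the return value.

-- ===== PORT A =====
-- A mutates its argument in place (pop); the equivalence proved here is about the
-- return value (which is the mutated list).  Mutual recursion: aOuter is the outer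
-- while-loop of A, aInner the inner one; 'pop?' returning none is unreachable (the
-- popped index is always in range) and then the current list is returned.
mutual
def aOuter (lst : List (List Int)) (i : Int) : List (List Int) :=
  if i < (lst.length : Int) then aInner lst i 0 else lst
termination_by (lst.length, ((lst.length : Int) + 1 - i).toNat, 0, 0)

def aInner (lst : List (List Int)) (i j : Int) : List (List Int) :=
  if hj : j < (lst.length : Int) then
    if i ≠ j then
      let si := PySem.Set.ofList (PySem.List.pyGetD lst i [])
      let sj := PySem.Set.ofList (PySem.List.pyGetD lst j [])
      let intersec := PySem.Set.inter si sj
      if PySem.Set.equal intersec si then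
        match hp : PySem.List.pop? lst i with
        | some (_, lst') =>
          if (i - 1) < 0 ∨ (j - 1) < 0 ∨ (lst'.length : Int) < 0 then aOuter lst' ((i - 1) + 1)
          else aInner lst' (i - 1) ((j - 1) + 1)
        | none => lst
      else if PySem.Set.equal intersec sj then
        match hp : PySem.List.pop? lst j with
        | some (_, lst') =>
          if (i - 1) < 0 ∨ (j - 1) < 0 ∨ (lst'.length : Int) < 0 then aOuter lst' ((i - 1) + 1)
          else aInner lst' (i - 1) ((j - 1) + 1)
        | none => lst
      else
        if i < 0 ∨ j < 0 ∨ (lst.length : Int) < 0 then aOuter lst (i + 1)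
        else aInner lst i (j + 1)
    else aInner lst i (j + 1)
  else aOuter lst (i + 1)
termination_by (lst.length, ((lst.length : Int) - i).toNat, ((lst.length : Int) - j).toNat, 1)
decreasing_by
  all_goals
    try have hlen : lst'.length + 1 = lst.length := PySem.List.length_of_pop?_eq_some _ hp
  all_goals simp only [Prod.lex_iff, true_and, lt_self_iff_false, false_or]
  all_goals omega
end

def retiraAutocontidas (comunidades : List (List Int)) : List (List Int) :=
  aOuter comunidades 0

-- ===== PORT B =====
-- B also mutates the argument (slice assignment); the return value is proved equal.
def retiraAutocontidas_alt (comunidades : List (List Int)) : List (List Int) :=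
  let sets := comunidades.map (fun c => PySem.Set.ofList c)
  let n := sets.length
  (List.range n).filterMap (fun i =>
    if (List.range n).any (fun j =>
         decide (j ≠ i) && PySem.Set.issubset (sets.getD i []) (sets.getD j [])
           && (!(PySem.Set.equal (sets.getD i []) (sets.getD j [])) || decide (i < j)))
    then none else some (comunidades.getD i []))

-- ===== PRECONDITION & SPEC =====
def Spec_retiraAutocontidas (comunidades : List (List Int)) (out : List (List Int)) : Prop := out = retiraAutocontidas_alt comunidades
instance (comunidades : List (List Int)) (out : List (List Int)) : Decidable (Spec_retiraAutocontidas comunidades out) := by unfold Spec_retiraAutocontidas; infer_instance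

-- ===== CLAIM (what is proved, stated in full; the proofs are below) =====
def Claim_equal_retiraAutocontidas : Prop := ∀ (comunidades : List (List Int)), Dom_retiraAutocontidas comunidades → Spec_retiraAutocontidas comunidades (retiraAutocontidas comunidades)

-- ===== LEMMAS AND PROOFS =====

-- Set-level boolean tests of the two ports, reduced to list subset ⊆ (= set containment).
theorem pv_issubset_iff (a b : List Int) :
    PySem.Set.issubset (PySem.Set.ofList a) (PySem.Set.ofList b) = true ↔ a ⊆ b := by
  rw [PySem.Set.issubset_iff]
  simp [PySem.Set.mem_ofList, List.subset_def]

theorem pv_equal_iff (a b : List Int) :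
    PySem.Set.equal (PySem.Set.ofList a) (PySem.Set.ofList b) = true ↔ (a ⊆ b ∧ b ⊆ a) := by
  rw [PySem.Set.equal_iff]
  simp only [PySem.Set.mem_ofList, List.subset_def]
  constructor
  · intro h; exact ⟨fun {x} hx => (h x).1 hx, fun {x} hx => (h x).2 hx⟩
  · intro ⟨h1, h2⟩ x; exact ⟨fun hx => h1 hx, fun hx => h2 hx⟩

theorem pv_inter_left_iff (a b : List Int) :
    PySem.Set.equal ((PySem.Set.ofList a).inter (PySem.Set.ofList b)) (PySem.Set.ofList a) = true ↔ a ⊆ b := by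
  rw [PySem.Set.equal_iff]
  simp only [PySem.Set.mem_inter, PySem.Set.mem_ofList, List.subset_def]
  constructor
  · intro h x hx; exact ((h x).2 hx).2
  · intro h x; exact ⟨fun hx => hx.1, fun hx => ⟨hx, h hx⟩⟩

theorem pv_inter_right_iff (a b : List Int) :
    PySem.Set.equal ((PySem.Set.ofList a).inter (PySem.Set.ofList b)) (PySem.Set.ofList b) = true ↔ b ⊆ a := by
  rw [PySem.Set.equal_iff]
  simp only [PySem.Set.mem_inter, PySem.Set.mem_ofList, List.subset_def]
  constructor
  · intro h x hx; exact ((h x).2 hx).1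
  · intro h x; exact ⟨fun hx => hx.2, fun hx => ⟨h hx, hx⟩⟩

-- lst[i] as B reads it (getD with default []).
def pvEntry (lst : List (List Int)) (i : Nat) : List Int := lst.getD i []

-- Index i is dropped by B's criterion: some other community contains it
-- (properly, or set-equal and later).
def pvDropped (lst : List (List Int)) (i : Nat) : Prop :=
  ∃ j < lst.length, j ≠ i ∧ pvEntry lst i ⊆ pvEntry lst j ∧
    (¬ pvEntry lst j ⊆ pvEntry lst i ∨ i < j)

def pvDroppedB (lst : List (List Int)) (i : Nat) : Bool :=
  (List.range lst.length).any (fun j =>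
    decide (j ≠ i) && decide (pvEntry lst i ⊆ pvEntry lst j) &&
      (!(decide (pvEntry lst j ⊆ pvEntry lst i)) || decide (i < j)))

-- The common abstract value both ports compute.
def pvF (lst : List (List Int)) : List (List Int) :=
  (List.range lst.length).filterMap (fun i =>
    if pvDroppedB lst i then none else some (pvEntry lst i))

theorem pvDroppedB_iff (lst : List (List Int)) (i : Nat) :
    pvDroppedB lst i = true ↔ pvDropped lst i := by
  unfold pvDroppedB pvDropped
  simp only [List.any_eq_true, List.mem_range, Bool.and_eq_true, Bool.or_eq_true,
    Bool.not_eq_eq_eq_not, Bool.not_true, decide_eq_true_eq, decide_eq_false_iff_not]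
  exact exists_congr fun j => by tauto

theorem alt_eq_pvF (lst : List (List Int)) : retiraAutocontidas_alt lst = pvF lst := by
  unfold retiraAutocontidas_alt pvF
  simp only [List.length_map]
  apply List.filterMap_congr
  intro i hi
  rw [List.mem_range] at hi
  have hget : ∀ m : Nat, m < lst.length →
      (lst.map (fun c => PySem.Set.ofList c)).getD m [] = PySem.Set.ofList (pvEntry lst m) := by
    intro m hm
    rw [List.getD_eq_getElem _ _ (by simpa using hm), List.getElem_map,
      pvEntry, List.getD_eq_getElem _ _ hm]
  have hcond : ∀ j : Nat, j < lst.length →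
      (decide (j ≠ i) && PySem.Set.issubset ((lst.map (fun c => PySem.Set.ofList c)).getD i [])
          ((lst.map (fun c => PySem.Set.ofList c)).getD j [])
        && (!(PySem.Set.equal ((lst.map (fun c => PySem.Set.ofList c)).getD i [])
              ((lst.map (fun c => PySem.Set.ofList c)).getD j [])) || decide (i < j)))
      = (decide (j ≠ i) && decide (pvEntry lst i ⊆ pvEntry lst j) &&
          (!(decide (pvEntry lst j ⊆ pvEntry lst i)) || decide (i < j))) := by
    intro j hj
    rw [hget i hi, hget j hj]
    by_cases hne : j ≠ i
    · by_cases hsub : pvEntry lst i ⊆ pvEntry lst j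
      · have h1 : PySem.Set.issubset (PySem.Set.ofList (pvEntry lst i)) (PySem.Set.ofList (pvEntry lst j)) = true :=
          (pv_issubset_iff _ _).mpr hsub
        by_cases hsub2 : pvEntry lst j ⊆ pvEntry lst i
        · have h2 : PySem.Set.equal (PySem.Set.ofList (pvEntry lst i)) (PySem.Set.ofList (pvEntry lst j)) = true :=
            (pv_equal_iff _ _).mpr ⟨hsub, hsub2⟩
          simp [h1, h2, hsub, hsub2, hne]
        · have h2 : PySem.Set.equal (PySem.Set.ofList (pvEntry lst i)) (PySem.Set.ofList (pvEntry lst j)) = false := by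
            rw [Bool.eq_false_iff]
            intro hc; exact hsub2 ((pv_equal_iff _ _).mp hc).2
          simp [h1, h2, hsub, hsub2, hne]
      · have h1 : PySem.Set.issubset (PySem.Set.ofList (pvEntry lst i)) (PySem.Set.ofList (pvEntry lst j)) = false := by
          rw [Bool.eq_false_iff]
          intro hc; exact hsub ((pv_issubset_iff _ _).mp hc)
        simp [h1, hsub, hne]
    · simp [hne]
  have hany : ((List.range lst.length).any (fun j =>
      decide (j ≠ i) && PySem.Set.issubset ((lst.map (fun c => PySem.Set.ofList c)).getD i [])
          ((lst.map (fun c => PySem.Set.ofList c)).getD j [])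
        && (!(PySem.Set.equal ((lst.map (fun c => PySem.Set.ofList c)).getD i [])
              ((lst.map (fun c => PySem.Set.ofList c)).getD j [])) || decide (i < j))))
      = pvDroppedB lst i := by
    unfold pvDroppedB
    rw [Bool.eq_iff_iff, List.any_eq_true, List.any_eq_true]
    constructor
    · rintro ⟨j, hj, h⟩
      exact ⟨j, hj, by rw [← hcond j (List.mem_range.mp hj)]; exact h⟩
    · rintro ⟨j, hj, h⟩
      exact ⟨j, hj, by rw [hcond j (List.mem_range.mp hj)]; exact h⟩
  rw [hany]
  rfl

theorem pvEntry_eraseIdx_lt (lst : List (List Int)) (k b : Nat) (h : b < k) :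
    pvEntry (lst.eraseIdx k) b = pvEntry lst b := by
  unfold pvEntry
  by_cases hb : b < lst.length
  · have hb' : b < (lst.eraseIdx k).length := by rw [List.length_eraseIdx]; split <;> omega
    rw [List.getD_eq_getElem _ _ hb', List.getD_eq_getElem _ _ hb, List.getElem_eraseIdx]
    simp [h]
  · have h1 : lst.getD b [] = [] := List.getD_eq_default _ _ (by omega)
    have h2 : (lst.eraseIdx k).getD b [] = [] := List.getD_eq_default _ _ (by
      rw [List.length_eraseIdx]; split <;> omega)
    rw [h1, h2]

theorem pvEntry_eraseIdx_ge (lst : List (List Int)) (k b : Nat) (hk : k ≤ b)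
    (hb : b + 1 < lst.length) : pvEntry (lst.eraseIdx k) b = pvEntry lst (b + 1) := by
  unfold pvEntry
  have hb' : b < (lst.eraseIdx k).length := by rw [List.length_eraseIdx]; split <;> omega
  rw [List.getD_eq_getElem _ _ hb', List.getD_eq_getElem _ _ hb, List.getElem_eraseIdx]
  simp [Nat.not_lt.mpr hk]

-- A dropped index ≠ k has a witness other than k, provided k is dropped too.
theorem pvDropped_strengthen (lst : List (List Int)) (k i : Nat)
    (hdk : pvDropped lst k) (hdi : pvDropped lst i) (hik : i ≠ k) :
    ∃ m < lst.length, m ≠ i ∧ m ≠ k ∧ pvEntry lst i ⊆ pvEntry lst m ∧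
      (¬ pvEntry lst m ⊆ pvEntry lst i ∨ i < m) := by
  obtain ⟨m0, hm0, hm0i, hsub0, htie0⟩ := hdi
  by_cases hm0k : m0 = k
  case neg => exact ⟨m0, hm0, hm0i, hm0k, hsub0, htie0⟩
  case pos =>
    subst hm0k
    obtain ⟨j0, hj0, hj0k, hsubk, htiek⟩ := hdk
    have hj0i : j0 ≠ i := by
      rintro rfl
      -- then i ⊆ k ⊆ j0 = i: both ties force i < k and k < i
      rcases htie0 with h | h
      · exact h (List.Subset.trans hsubk (List.Subset.refl _))
      · rcases htiek with h' | h'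
        · exact h' (List.Subset.trans hsub0 (List.Subset.refl _))
        · omega
    refine ⟨j0, hj0, hj0i, hj0k, List.Subset.trans hsub0 hsubk, ?_⟩
    rcases htiek with h | h
    · left; intro hc; exact h (List.Subset.trans hc hsub0)
    · rcases htie0 with h' | h'
      · left; intro hc; exact h' (List.Subset.trans hsubk hc)
      · right; omega

-- Removing a dropped index k does not change who is dropped (indices shift).
theorem pvDropped_erase (lst : List (List Int)) (k : Nat) (hk : k < lst.length)
    (hdk : pvDropped lst k) (b : Nat) (hb : b < lst.length - 1) :
    pvDropped (lst.eraseIdx k) b ↔ pvDropped lst (if b < k then b else b + 1) := by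
  have hlen' : (lst.eraseIdx k).length = lst.length - 1 := by
    rw [List.length_eraseIdx]; simp [hk]
  have hE : ∀ c, c < lst.length - 1 →
      pvEntry (lst.eraseIdx k) c = pvEntry lst (if c < k then c else c + 1) := by
    intro c hc
    split
    · exact pvEntry_eraseIdx_lt lst k c (by omega)
    · exact pvEntry_eraseIdx_ge lst k c (by omega) (by omega)
  have hBk : (if b < k then b else b + 1) ≠ k := by split <;> omega
  constructor
  · rintro ⟨j, hj, hjb, hsub, htie⟩
    rw [hlen'] at hj
    refine ⟨if j < k then j else j + 1, by split <;> omega, by split <;> split <;> omega, ?_, ?_⟩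
    · rw [← hE j hj, ← hE b hb]; exact hsub
    · rcases htie with h | h
      · left; rw [← hE j hj, ← hE b hb]; exact h
      · right; split <;> split <;> omega
  · intro hdB
    obtain ⟨m, hm, hmB, hmk, hsub, htie⟩ :=
      pvDropped_strengthen lst k (if b < k then b else b + 1) hdk hdB (by omega)
    refine ⟨if m < k then m else m - 1, by rw [hlen']; split <;> omega, ?_, ?_, ?_⟩
    · split <;> split at hmB <;> omega
    · have hm' : (if (if m < k then m else m - 1) < k then (if m < k then m else m - 1)
          else (if m < k then m else m - 1) + 1) = m := by
        by_cases h : m < k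
        · simp [h]
        · have h2 : ¬ (m - 1 < k) := by omega
          simp [h, h2]; omega
      rw [hE b hb, hE _ (by split <;> omega), hm']
      exact hsub
    · have hm' : (if (if m < k then m else m - 1) < k then (if m < k then m else m - 1)
          else (if m < k then m else m - 1) + 1) = m := by
        by_cases h : m < k
        · simp [h]
        · have h2 : ¬ (m - 1 < k) := by omega
          simp [h, h2]; omega
      rcases htie with h | h
      · left; rw [hE b hb, hE _ (by split <;> omega), hm']; exact h
      · right; split at h <;> split <;> omega

-- Removing a dropped index does not change B's result.
theorem pvF_erase (lst : List (List Int)) (k : Nat) (hk : k < lst.length)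
    (hdk : pvDropped lst k) : pvF (lst.eraseIdx k) = pvF lst := by
  have hlen' : (lst.eraseIdx k).length = lst.length - 1 := by
    rw [List.length_eraseIdx]; simp [hk]
  have hB : ∀ c, c < lst.length - 1 →
      pvDroppedB (lst.eraseIdx k) c = pvDroppedB lst (if c < k then c else c + 1) := by
    intro c hc
    rw [Bool.eq_iff_iff, pvDroppedB_iff, pvDroppedB_iff]
    exact pvDropped_erase lst k hk hdk c hc
  have hkB : pvDroppedB lst k = true := (pvDroppedB_iff lst k).mpr hdk
  obtain ⟨t, ht⟩ : ∃ t, lst.length = (k + 1) + t := ⟨lst.length - (k + 1), by omega⟩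
  unfold pvF
  rw [hlen', ht]
  rw [show k + 1 + t - 1 = k + t from by omega, List.range_add, List.range_add,
    List.range_succ, List.append_assoc, List.filterMap_append, List.filterMap_append,
    List.filterMap_append, List.filterMap_map, List.filterMap_map]
  congr 1
  · -- prefix: indices below k are unchanged
    apply List.filterMap_congr
    intro c hc
    rw [List.mem_range] at hc
    have hc' : c < lst.length - 1 := by omega
    rw [hB c hc', if_pos hc, pvEntry_eraseIdx_lt lst k c hc]
  · -- index k is dropped; the tail shifts down by one
    have hknone : List.filterMap (fun i => if pvDroppedB lst i then none
        else some (pvEntry lst i)) [k] = [] := by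
      simp [hkB]
    rw [hknone, List.nil_append]
    apply List.filterMap_congr
    intro c hc
    rw [List.mem_range] at hc
    have hc' : k + c < lst.length - 1 := by omega
    have h1 : ¬ (k + c < k) := by omega
    simp only [Function.comp]
    rw [hB (k + c) hc', if_neg h1, pvEntry_eraseIdx_ge lst k (k + c) (by omega) (by omega)]
    have h2 : k + 1 + c = k + c + 1 := by omega
    rw [h2]
theorem pvF_of_no_dropped (lst : List (List Int))
    (h : ∀ i < lst.length, ¬ pvDropped lst i) : pvF lst = lst := by
  unfold pvF
  rw [List.filterMap_congr (g := fun i => some (pvEntry lst i))]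
  · show List.filterMap (some ∘ (pvEntry lst)) _ = _
    rw [List.filterMap_eq_map]
    apply List.ext_getElem
    · simp
    · intro n h1 h2
      simp only [List.getElem_map, List.getElem_range]
      exact List.getD_eq_getElem _ _ h2
  · intro x hx
    rw [if_neg]
    simp only [List.mem_range] at hx
    exact fun hb => h x hx ((pvDroppedB_iff lst x).mp hb)

-- Loop invariants of A: the prefix before i is set-incomparable with everything,
-- and the current element is set-incomparable with the already-scanned part.
def pvPfx (lst : List (List Int)) (i : Int) : Prop :=
  ∀ a : Nat, (a : Int) < i → a < lst.length → ∀ b : Nat, b < lst.length → b ≠ a →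
    ¬ pvEntry lst a ⊆ pvEntry lst b ∧ ¬ pvEntry lst b ⊆ pvEntry lst a

def pvCur (lst : List (List Int)) (i : Nat) (j : Int) : Prop :=
  ∀ b : Nat, (b : Int) < j → b < lst.length → b ≠ i →
    ¬ pvEntry lst i ⊆ pvEntry lst b ∧ ¬ pvEntry lst b ⊆ pvEntry lst i

theorem pvPfx_no_dropped (lst : List (List Int)) (i : Int)
    (hlen : (lst.length : Int) ≤ i) (hp : pvPfx lst i) :
    ∀ a < lst.length, ¬ pvDropped lst a := by
  rintro a ha ⟨j, hj, hne, hsub, -⟩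
  exact (hp a (by omega) ha j hj hne).1 hsub

theorem pvPfx_mono (lst : List (List Int)) (i' i : Int) (h : i' ≤ i) (hp : pvPfx lst i) :
    pvPfx lst i' :=
  fun a ha halen => hp a (by omega) halen

theorem pvPfx_erase (lst : List (List Int)) (k : Nat) (hk : k < lst.length) (i' : Int)
    (hik : i' ≤ (k : Int)) (hp : pvPfx lst i') : pvPfx (lst.eraseIdx k) i' := by
  have hlen' : (lst.eraseIdx k).length = lst.length - 1 := by
    rw [List.length_eraseIdx]; simp [hk]
  intro a ha halen' b hb hba
  have hak : a < k := by omega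
  rw [pvEntry_eraseIdx_lt lst k a hak]
  rcases Nat.lt_or_ge b k with hbk | hbk
  · rw [pvEntry_eraseIdx_lt lst k b hbk]
    exact hp a ha (by omega) b (by omega) hba
  · rw [pvEntry_eraseIdx_ge lst k b hbk (by omega)]
    exact hp a ha (by omega) (b + 1) (by omega) (by omega)

theorem pvCur_of_pfx_erase (lst : List (List Int)) (k : Nat) (hk : k < lst.length) (i : Int)
    (hi1 : 1 ≤ i) (hik : i ≤ (k : Int)) (hp : pvPfx lst i) (j : Int) :
    pvCur (lst.eraseIdx k) (i - 1).toNat j := by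
  have hlen' : (lst.eraseIdx k).length = lst.length - 1 := by
    rw [List.length_eraseIdx]; simp [hk]
  intro b hbj hblen' hbne
  have hc : (i - 1).toNat < k := by omega
  rw [pvEntry_eraseIdx_lt lst k _ hc]
  rcases Nat.lt_or_ge b k with hbk | hbk
  · rw [pvEntry_eraseIdx_lt lst k b hbk]
    exact hp (i - 1).toNat (by omega) (by omega) b (by omega) hbne
  · rw [pvEntry_eraseIdx_ge lst k b hbk (by omega)]
    exact hp (i - 1).toNat (by omega) (by omega) (b + 1) (by omega) (by omega)

-- inner loop at or past the end: A moves on to the next outer index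
theorem pv_end_aux (lst : List (List Int)) (i : Int) (hi : 0 ≤ i)
    (hp : pvPfx lst i)
    (Hnext : pvPfx lst (i + 1) → aOuter lst (i + 1) = pvF lst)
    (j : Int) (hj : (lst.length : Int) ≤ j) (hcur : pvCur lst i.toNat j) :
    aInner lst i j = pvF lst := by
  rw [aInner, dif_neg (by omega)]
  apply Hnext
  intro a ha halen b hb hba
  by_cases hai : a = i.toNat
  · subst hai
    exact hcur b (by omega) hb hba
  · exact hp a (by omega) halen b hb hba

theorem pv_inner_aux (lst : List (List Int)) (i : Int)
    (IH1 : ∀ lst' : List (List Int), lst'.length < lst.length →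
      (∀ i' j' : Int, 0 ≤ i' → i' < (lst'.length : Int) → 0 ≤ j' → pvPfx lst' i' →
        pvCur lst' i'.toNat j' → aInner lst' i' j' = pvF lst') ∧
      (∀ i' : Int, 0 ≤ i' → pvPfx lst' i' → aOuter lst' i' = pvF lst'))
    (hi : 0 ≤ i) (hlt : i < (lst.length : Int)) (hp : pvPfx lst i)
    (Hnext : pvPfx lst (i + 1) → aOuter lst (i + 1) = pvF lst) :
    ∀ d : Nat, ∀ j : Int, 0 ≤ j → ((lst.length : Int) - j).toNat ≤ d →
      pvCur lst i.toNat j → aInner lst i j = pvF lst := by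
  intro d
  induction d with
  | zero =>
    intro j hj0 hjd hcur
    exact pv_end_aux lst i hi hp Hnext j (by omega) hcur
  | succ d ihd =>
    intro j hj0 hjd hcur
    by_cases hjlt : j < (lst.length : Int)
    case neg => exact pv_end_aux lst i hi hp Hnext j (by omega) hcur
    case pos =>
    rw [aInner, dif_pos hjlt]
    by_cases hij : i ≠ j
    case neg =>
      rw [if_neg hij]
      have hij' : i = j := not_not.mp hij
      have htn : i.toNat = j.toNat := by rw [hij']
      apply ihd (j + 1) (by omega) (by omega)
      intro b hb hblen hbne
      exact hcur b (by omega) hblen hbne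
    case pos =>
    have hei : PySem.List.pyGetD lst i [] = pvEntry lst i.toNat := by
      rw [PySem.List.pyGetD_of_nonneg _ _ hi]; rfl
    have hej : PySem.List.pyGetD lst j [] = pvEntry lst j.toNat := by
      rw [PySem.List.pyGetD_of_nonneg _ _ hj0]; rfl
    have hilen : i.toNat < lst.length := by omega
    have hjlen : j.toNat < lst.length := by omega
    rw [if_pos hij]
    by_cases hab : pvEntry lst i.toNat ⊆ pvEntry lst j.toNat
    · -- set(lst[i]) ⊆ set(lst[j]): A pops index i
      have h1 : PySem.Set.equal ((PySem.Set.ofList (PySem.List.pyGetD lst i [])).inter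
          (PySem.Set.ofList (PySem.List.pyGetD lst j [])))
          (PySem.Set.ofList (PySem.List.pyGetD lst i [])) = true := by
        rw [hei, hej]; exact (pv_inter_left_iff _ _).mpr hab
      simp only [h1, if_true]
      have hij' : i < j := by
        by_contra hc
        exact (hp j.toNat (by omega) hjlen i.toNat hilen (by omega)).2 hab
      have hpop := PySem.List.pop?_natCast lst i.toNat hilen
      rw [show ((i.toNat : Nat) : Int) = i from by omega] at hpop
      have hdrop : pvDropped lst i.toNat := ⟨j.toNat, hjlen, by omega, hab, Or.inr (by omega)⟩
      have hFe : pvF (lst.eraseIdx i.toNat) = pvF lst := pvF_erase lst i.toNat hilen hdrop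
      have hlen' : (lst.eraseIdx i.toNat).length = lst.length - 1 := by
        rw [List.length_eraseIdx]; simp [hilen]
      split
      · rename_i fst lstx heq
        rw [hpop] at heq
        injection heq with heq2
        injection heq2 with h3 h4
        subst h4
        by_cases hi0 : i = 0
        · rw [if_pos (by omega)]
          rw [show i - 1 + 1 = 0 from by omega]
          rw [(IH1 _ (by omega)).2 0 le_rfl (fun a ha _ _ _ _ => absurd ha (by omega))]
          exact hFe
        · rw [if_neg (by omega)]
          rw [show j - 1 + 1 = j from by omega]
          have hPfx' : pvPfx (lst.eraseIdx i.toNat) (i - 1) :=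
            pvPfx_erase lst i.toNat hilen (i - 1) (by omega)
              (pvPfx_mono lst (i - 1) i (by omega) hp)
          have hCur' : pvCur (lst.eraseIdx i.toNat) (i - 1).toNat j :=
            pvCur_of_pfx_erase lst i.toNat hilen i (by omega) (by omega) hp j
          rw [(IH1 _ (by omega)).1 (i - 1) j (by omega) (by omega) (by omega) hPfx' hCur']
          exact hFe
      · rename_i heq
        rw [hpop] at heq
        exact absurd heq (by simp)
    · have h1f : PySem.Set.equal ((PySem.Set.ofList (PySem.List.pyGetD lst i [])).inter
          (PySem.Set.ofList (PySem.List.pyGetD lst j [])))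
          (PySem.Set.ofList (PySem.List.pyGetD lst i [])) = false := by
        rw [Bool.eq_false_iff]
        intro hc
        rw [hei, hej] at hc
        exact hab ((pv_inter_left_iff _ _).mp hc)
      by_cases hba : pvEntry lst j.toNat ⊆ pvEntry lst i.toNat
      · -- set(lst[j]) ⊊ set(lst[i]): A pops index j
        have h2 : PySem.Set.equal ((PySem.Set.ofList (PySem.List.pyGetD lst i [])).inter
            (PySem.Set.ofList (PySem.List.pyGetD lst j [])))
            (PySem.Set.ofList (PySem.List.pyGetD lst j [])) = true := by
          rw [hei, hej]; exact (pv_inter_right_iff _ _).mpr hba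
        simp only [h1f, Bool.false_eq_true, if_false, h2, if_true]
        have hij' : i < j := by
          by_contra hc
          exact (hp j.toNat (by omega) hjlen i.toNat hilen (by omega)).1 hba
        have hpop := PySem.List.pop?_natCast lst j.toNat hjlen
        rw [show ((j.toNat : Nat) : Int) = j from by omega] at hpop
        have hdrop : pvDropped lst j.toNat := ⟨i.toNat, hilen, by omega, hba, Or.inl hab⟩
        have hFe : pvF (lst.eraseIdx j.toNat) = pvF lst := pvF_erase lst j.toNat hjlen hdrop
        have hlen' : (lst.eraseIdx j.toNat).length = lst.length - 1 := by
          rw [List.length_eraseIdx]; simp [hjlen]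
        split
        · rename_i fst lstx heq
          rw [hpop] at heq
          injection heq with heq2
          injection heq2 with h3 h4
          subst h4
          by_cases hi0 : i = 0
          · rw [if_pos (by omega)]
            rw [show i - 1 + 1 = 0 from by omega]
            rw [(IH1 _ (by omega)).2 0 le_rfl (fun a ha _ _ _ _ => absurd ha (by omega))]
            exact hFe
          · rw [if_neg (by omega)]
            rw [show j - 1 + 1 = j from by omega]
            have hPfx' : pvPfx (lst.eraseIdx j.toNat) (i - 1) :=
              pvPfx_erase lst j.toNat hjlen (i - 1) (by omega)
                (pvPfx_mono lst (i - 1) i (by omega) hp)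
            have hCur' : pvCur (lst.eraseIdx j.toNat) (i - 1).toNat j :=
              pvCur_of_pfx_erase lst j.toNat hjlen i (by omega) (by omega) hp j
            rw [(IH1 _ (by omega)).1 (i - 1) j (by omega) (by omega) (by omega) hPfx' hCur']
            exact hFe
        · rename_i heq
          rw [hpop] at heq
          exact absurd heq (by simp)
      · -- incomparable: A keeps scanning
        have h2f : PySem.Set.equal ((PySem.Set.ofList (PySem.List.pyGetD lst i [])).inter
            (PySem.Set.ofList (PySem.List.pyGetD lst j [])))
            (PySem.Set.ofList (PySem.List.pyGetD lst j [])) = false := by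
          rw [Bool.eq_false_iff]
          intro hc
          rw [hei, hej] at hc
          exact hba ((pv_inter_right_iff _ _).mp hc)
        simp only [h1f, h2f, Bool.false_eq_true, if_false]
        rw [if_neg (by omega)]
        apply ihd (j + 1) (by omega) (by omega)
        intro b hbj1 hblen hbne
        by_cases hbj : (b : Int) < j
        · exact hcur b hbj hblen hbne
        · have hbj' : b = j.toNat := by omega
          subst hbj'
          exact ⟨hab, hba⟩

theorem pv_main (K : Nat) : ∀ lst : List (List Int), lst.length ≤ K →
    (∀ i' j' : Int, 0 ≤ i' → i' < (lst.length : Int) → 0 ≤ j' → pvPfx lst i' →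
      pvCur lst i'.toNat j' → aInner lst i' j' = pvF lst) ∧
    (∀ i' : Int, 0 ≤ i' → pvPfx lst i' → aOuter lst i' = pvF lst) := by
  induction K using Nat.strong_induction_on with
  | _ K IH =>
    intro lst hK
    have IH1 : ∀ lst' : List (List Int), lst'.length < lst.length →
        (∀ i' j' : Int, 0 ≤ i' → i' < (lst'.length : Int) → 0 ≤ j' → pvPfx lst' i' →
          pvCur lst' i'.toNat j' → aInner lst' i' j' = pvF lst') ∧
        (∀ i' : Int, 0 ≤ i' → pvPfx lst' i' → aOuter lst' i' = pvF lst') :=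
      fun lst' h => IH lst'.length (by omega) lst' le_rfl
    have houter : ∀ e : Nat, ∀ i : Int, 0 ≤ i → ((lst.length : Int) - i).toNat ≤ e →
        pvPfx lst i → aOuter lst i = pvF lst := by
      intro e
      induction e with
      | zero =>
        intro i hi hle hp
        rw [aOuter, if_neg (by omega)]
        exact (pvF_of_no_dropped lst (pvPfx_no_dropped lst i (by omega) hp)).symm
      | succ e ihe =>
        intro i hi hle hp
        by_cases hlt : i < (lst.length : Int)
        · rw [aOuter, if_pos hlt]
          exact pv_inner_aux lst i IH1 hi hlt hp
            (fun hp' => ihe (i + 1) (by omega) (by omega) hp')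
            lst.length 0 le_rfl (by omega) (fun b hb _ _ => absurd hb (by omega))
        · rw [aOuter, if_neg hlt]
          exact (pvF_of_no_dropped lst (pvPfx_no_dropped lst i (by omega) hp)).symm
    constructor
    · intro i j hi hlt hj hp hcur
      exact pv_inner_aux lst i IH1 hi hlt hp
        (fun hp' => houter ((lst.length : Int) - (i + 1)).toNat (i + 1) (by omega) le_rfl hp')
        ((lst.length : Int) - j).toNat j hj le_rfl hcur
    · intro i hi hp
      exact houter ((lst.length : Int) - i).toNat i hi le_rfl hp


-- ===== VERDICT (by name: the statement is the Claim_ definition above) =====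
theorem retiraAutocontidas_spec : Claim_equal_retiraAutocontidas := by
  intro lst _
  unfold Spec_retiraAutocontidas retiraAutocontidas
  rw [alt_eq_pvF]
  exact (pv_main lst.length lst le_rfl).2 0 le_rfl (fun a ha _ _ _ _ => absurd ha (by omega))
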